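-- pv_equiv track=rewrite | github.com/dinhlocpisces6301/AsciiCipherPython | vnchar.py | getSyl
-- ===== SOURCE A (Python) =====
-- syllable = [
--     [   'a', 'e', 'i', 'o', 'u'             ],
--     [
--         'ac', 'ai', 'am', 'an', 'ao',
--         'ap', 'at', 'au', 'ay', 'em',
--         'en', 'eo', 'ep', 'et', 'eu',
--         'ia', 'im', 'in', 'ip', 'it',
--         'iu', 'oa', 'oc', 'oe', 'oi',
--         'om', 'on', 'op', 'ot', 'ua',
--         'uc', 'ue', 'ui', 'um', 'un',
--         'uo', 'up', 'ut', 'uu', 'uy',       ],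
--     [
--         'ach', 'ang', 'anh', 'eng', 'ech',
--         'enh', 'ich', 'inh', 'ong', 'ung',
--         'iec', 'oai', 'iem', 'ien', 'iep',
--         'iet', 'ieu', 'oan', 'oat', 'oay',
--         'uan', 'uat', 'uoc', 'uoi', 'uom',
--         'oun', 'uot', 'uya', 'uyt', 'uop',
--         'uou', 'yen', 'yem', 'yeu'          ],
--     [
--         'oach', 'ieng', 'oang', 'oanh',
--         'oung', 'uych', 'uynh', 'uyen',
--         'uyet', 'oong'                      ],
-- ]
--
-- def getSyl(word): #Lấy vần
--     syl = ''
--     isAdded = False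
--     isSyllable = False
--     for letter in word:
--         isAdded = False
--         if(letter in syllable[0]):
--             syl += letter
--             isAdded = True
--             isSyllable = True
--         elif(isSyllable == True and isAdded == False):
--             syl += letter
--     return syl
-- ===== SOURCE B (Python) =====
-- def getSyl(word):
--     i = next((j for j, c in enumerate(word) if c in 'aeiou'), len(word))
--     return ''.join(word[i:])
-- ===== Notes on version B (the rewrite author's own statement) =====
-- stated objective: simpler
-- what changed: Replaced the per-character accumulator loop with two boolean flags by finding the index of the first vowel and returning the suffix slice from there.
import Mathlib
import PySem

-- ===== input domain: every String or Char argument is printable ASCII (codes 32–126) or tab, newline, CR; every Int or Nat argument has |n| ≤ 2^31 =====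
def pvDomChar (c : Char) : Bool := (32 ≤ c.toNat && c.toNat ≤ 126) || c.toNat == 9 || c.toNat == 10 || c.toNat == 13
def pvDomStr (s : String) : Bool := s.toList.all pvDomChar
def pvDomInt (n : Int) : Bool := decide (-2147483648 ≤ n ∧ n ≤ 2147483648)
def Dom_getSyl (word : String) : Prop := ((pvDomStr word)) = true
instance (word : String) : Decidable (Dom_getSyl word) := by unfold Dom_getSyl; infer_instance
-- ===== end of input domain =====

-- B: find-first-vowel-index then slice, instead of A's accumulator loop with flags (objective: simpler).
-- ===== PORT A =====
def getSylVowels : List Char := ['a', 'e', 'i', 'o', 'u']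

def getSylStep (s : List Char × Bool × Bool) (letter : Char) : List Char × Bool × Bool :=
  let syl := s.1
  let isSyllable := s.2.2
  -- isAdded := False (reset each iteration)
  let isAdded := false
  if getSylVowels.contains letter then
    (syl ++ [letter], true, true)
  else if isSyllable = true && isAdded = false then
    (syl ++ [letter], isAdded, isSyllable)
  else
    (syl, isAdded, isSyllable)

def getSyl (word : String) : String :=
  String.mk (word.toList.foldl getSylStep ([], false, false)).1

-- ===== PORT B =====
def getSyl_alt (word : String) : String :=
  String.mk (word.toList.dropWhile (fun c => !(['a','e','i','o','u'].contains c)))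

-- ===== PRECONDITION & SPEC =====
def Spec_getSyl (word : String) (out : String) : Prop := out = getSyl_alt word
instance (word : String) (out : String) : Decidable (Spec_getSyl word out) := by unfold Spec_getSyl; infer_instance

-- ===== CLAIM (what is proved, stated in full; the proofs are below) =====
def Claim_equal_getSyl : Prop := ∀ (word : String), Dom_getSyl word → Spec_getSyl word (getSyl word)

-- ===== LEMMAS AND PROOFS =====

-- ===== VERDICT (by name: the statement is the Claim_ definition above) =====
-- once isSyllable is true, the loop appends every remaining letter
theorem getSyl_after (l : List Char) (syl : List Char) (a : Bool) :
    (l.foldl getSylStep (syl, a, true)).1 = syl ++ l := by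
  induction l generalizing syl a with
  | nil => simp
  | cons c t ih =>
    simp only [List.foldl_cons, getSylStep]
    split_ifs <;> simp_all [ih]

theorem getSyl_main (l : List Char) (a : Bool) :
    (l.foldl getSylStep ([], a, false)).1
      = l.dropWhile (fun c => !(['a','e','i','o','u'].contains c)) := by
  induction l generalizing a with
  | nil => simp
  | cons c t ih =>
    simp only [List.foldl_cons, getSylStep, List.dropWhile]
    by_cases hm : c ∈ getSylVowels
    · have hv := hm
      simp only [getSylVowels, List.mem_cons, List.not_mem_nil, or_false] at hv
      rcases hv with rfl | rfl | rfl | rfl | rfl <;> simp [getSyl_after, getSylVowels]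
    · have hv := hm
      simp only [getSylVowels, List.mem_cons, List.not_mem_nil, or_false, not_or] at hv
      obtain ⟨h1, h2, h3, h4, h5⟩ := hv
      simp [hm, h1, h2, h3, h4, h5, ih]

theorem getSyl_spec : Claim_equal_getSyl := by
  intro word _
  unfold Spec_getSyl getSyl getSyl_alt
  rw [getSyl_main]
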